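-- pv_equiv track=rewrite | github.com/Pummelchen/FXAI | FXAI/Tools/offline_lab/common.py | resolve_months_list
-- ===== SOURCE A (Python) =====
-- DEFAULT_MONTHS_LIST = [3, 6, 12]
--
-- def parse_csv_tokens(raw: str) -> list[str]:
--     text = (raw or "").strip()
--     if not text:
--         return []
--     text = text.replace("{", "").replace("}", "").replace(";", ",").replace("|", ",")
--     out: list[str] = []
--     for part in text.split(","):
--         token = part.strip()
--         if token and token not in out:
--             out.append(token)
--     return out
--
-- def resolve_months_list(raw: str) -> list[int]:
--     items = parse_csv_tokens(raw)
--     out: list[int] = []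
--     for item in items:
--         try:
--             months = int(item)
--         except Exception:
--             continue
--         if months > 0 and months not in out:
--             out.append(months)
--     return out or list(DEFAULT_MONTHS_LIST)
-- ===== SOURCE B (Python) =====
-- def _dedup_first(xs):
--     # order-preserving dedup by recursion: keep the head, drop all its later copies
--     if not xs:
--         return []
--     head = xs[0]
--     return [head] + _dedup_first([y for y in xs[1:] if y != head])
--
--
-- def resolve_months_list(raw: str) -> list[int]:
--     text = (raw or "").strip()
--     if not text:
--         return [3, 6, 12]
--     for old, new in (("{", ""), ("}", ""), (";", ","), ("|", ",")):
--         text = text.replace(old, new)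
--     positives = []
--     for part in text.split(","):
--         try:
--             m = int(part.strip())
--         except Exception:
--             continue
--         if m > 0:
--             positives.append(m)
--     out = _dedup_first(positives)
--     return out or [3, 6, 12]
-- ===== Notes on version B (the rewrite author's own statement) =====
-- stated objective: alternative
-- what changed: A runs two membership-accumulator dedup loops ('x not in out' for string tokens, then again for ints); B is a staged pipeline with no string-level dedup at all: it collects the positive ints WITH duplicates in one collection loop, then deduplicates by a recursive filter (keep the head, filter its copies out of the tail), returning the default early for empty/blank input.
import Mathlib
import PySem

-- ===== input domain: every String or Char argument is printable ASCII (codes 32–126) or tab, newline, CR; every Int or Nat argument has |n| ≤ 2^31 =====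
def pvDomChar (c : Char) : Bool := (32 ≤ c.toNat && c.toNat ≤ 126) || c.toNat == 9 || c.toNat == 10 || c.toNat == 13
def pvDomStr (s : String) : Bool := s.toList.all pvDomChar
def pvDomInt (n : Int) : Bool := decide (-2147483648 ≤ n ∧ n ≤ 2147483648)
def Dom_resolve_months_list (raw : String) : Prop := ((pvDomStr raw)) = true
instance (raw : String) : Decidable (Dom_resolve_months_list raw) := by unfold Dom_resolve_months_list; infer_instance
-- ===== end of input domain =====

-- B replaces A's two membership-accumulator dedup loops (string tokens, then ints) by a
-- staged pipeline: collect positive ints WITH duplicates, then a recursive filter-based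
-- first-occurrence dedup; objective: alternative structure, same exact values.

-- ===== PORT A =====
-- normalization chain of parse_csv_tokens (the literal replace chain)
def pvNormalize (text : String) : String :=
  PySem.Str.replace (PySem.Str.replace (PySem.Str.replace (PySem.Str.replace text "{" "") "}" "") ";" ",") "|" ","

-- text.split(",") with the literal non-empty separator (split? is none only for sep = "")
def pvSplitComma (text : String) : List String :=
  (PySem.Str.split? text ",").getD []

-- int-accumulation step of resolve_months_list's loop (try int / > 0 / dedup / append)
def pvStepInt (out : List Int) (item : String) : List Int :=
  match PySem.Int.ofStr? item with
  | none => out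
  | some months => if 0 < months ∧ months ∉ out then out ++ [months] else out

-- string-dedup step of parse_csv_tokens' loop (applied to token = part.strip())
def pvStepTok (out : List String) (token : String) : List String :=
  if token ≠ "" ∧ token ∉ out then out ++ [token] else out

def parse_csv_tokens (raw : String) : List String :=
  let text := PySem.Str.strip (if raw == "" then "" else raw)
  if text == "" then []
  else
    let text := pvNormalize text
    (pvSplitComma text).foldl (fun out part => pvStepTok out (PySem.Str.strip part)) []

def resolve_months_list (raw : String) : List Int :=
  let items := parse_csv_tokens raw
  let out := items.foldl pvStepInt []
  if out == [] then [3, 6, 12] else out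

-- ===== PORT B =====
-- B's replace loop runs over this literal pair list
def pvReplacePairs : List (String × String) := [("{", ""), ("}", ""), (";", ","), ("|", ",")]

-- B's recursive first-occurrence dedup: keep the head, drop its later copies
def pvDedup : List Int → List Int
  | [] => []
  | x :: xs => x :: pvDedup (xs.filter (fun y => y ≠ x))
termination_by xs => xs.length
decreasing_by
  simp only [List.length_unattach, List.length_cons]
  exact Nat.lt_succ_of_le (le_of_le_of_eq (List.length_filter_le _ _) (by simp))

-- B's per-part step: try int(part.strip()), keep when positive (duplicates kept)
def pvPosStep (acc : List Int) (p : String) : List Int :=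
  match PySem.Int.ofStr? p with
  | none => acc
  | some m => if 0 < m then acc ++ [m] else acc

def resolve_months_list_alt (raw : String) : List Int :=
  let text := PySem.Str.strip (if raw == "" then "" else raw)
  if text == "" then [3, 6, 12]
  else
    let text := pvReplacePairs.foldl (fun t p => PySem.Str.replace t p.1 p.2) text
    let positives := (pvSplitComma text).foldl
      (fun acc part => pvPosStep acc (PySem.Str.strip part)) []
    let out := pvDedup positives
    if out == [] then [3, 6, 12] else out

-- ===== PRECONDITION & SPEC =====
def Spec_resolve_months_list (raw : String) (out : List Int) : Prop := out = resolve_months_list_alt raw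
instance (raw : String) (out : List Int) : Decidable (Spec_resolve_months_list raw out) := by unfold Spec_resolve_months_list; infer_instance

-- ===== CLAIM (what is proved, stated in full; the proofs are below) =====
def Claim_equal_resolve_months_list : Prop := ∀ (raw : String), Dom_resolve_months_list raw → Spec_resolve_months_list raw (resolve_months_list raw)

-- ===== LEMMAS AND PROOFS =====

-- the NEW tokens appended by parse_csv_tokens' dedup fold, given the already-seen ones
def pvNewOf (seen : List String) : List String → List String
  | [] => []
  | x :: xs =>
      if x ≠ "" ∧ x ∉ seen then x :: pvNewOf (seen ++ [x]) xs
      else pvNewOf seen xs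

-- "t's contribution is already in acc"
def pvDone (t : String) (acc : List Int) : Prop :=
  ∀ m, PySem.Int.ofStr? t = some m → 0 < m → m ∈ acc

-- the positive ints of a token list, in order, with duplicates (B's 'positives' stage)
def pvPosOf : List String → List Int
  | [] => []
  | p :: l =>
      match PySem.Int.ofStr? p with
      | none => pvPosOf l
      | some m => if 0 < m then m :: pvPosOf l else pvPosOf l

theorem pvDedup_nil : pvDedup [] = [] := by rw [pvDedup.eq_def]

theorem pvDedup_cons (x : Int) (xs : List Int) :
    pvDedup (x :: xs) = x :: pvDedup (xs.filter (fun y => y ≠ x)) := by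
  rw [pvDedup.eq_def]

theorem pvStepTok_foldl_eq (xs : List String) (seen : List String) :
    xs.foldl pvStepTok seen = seen ++ pvNewOf seen xs := by
  induction xs generalizing seen with
  | nil => simp [pvNewOf]
  | cons x xs ih =>
      simp only [List.foldl_cons, pvNewOf, pvStepTok]
      by_cases h : x ≠ "" ∧ x ∉ seen
      · simp [h, ih]
      · simp [h, ih]

theorem pvStepInt_grow {m : Int} {acc : List Int} (t : String) (h : m ∈ acc) :
    m ∈ pvStepInt acc t := by
  cases hof : PySem.Int.ofStr? t with
  | none => simp [pvStepInt, hof, h]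
  | some k =>
      simp only [pvStepInt, hof]
      split
      · simp [h]
      · exact h

theorem pvStepInt_noop {t : String} {acc : List Int} (h : pvDone t acc) :
    pvStepInt acc t = acc := by
  cases hof : PySem.Int.ofStr? t with
  | none => simp [pvStepInt, hof]
  | some k =>
      simp only [pvStepInt, hof]
      by_cases hk : 0 < k
      · exact if_neg (fun hc => hc.2 (h k hof hk))
      · exact if_neg (fun hc => hk hc.1)

theorem pvStepInt_done {t : String} {acc : List Int} : pvDone t (pvStepInt acc t) := by
  intro m hof hm
  simp only [pvStepInt, hof]
  by_cases hc : m ∈ acc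
  · split
    · simp
    · exact hc
  · rw [if_pos ⟨hm, hc⟩]; simp

theorem pvDone_grow {t u : String} {acc : List Int} (h : pvDone t acc) :
    pvDone t (pvStepInt acc u) := fun m hof hm => pvStepInt_grow u (h m hof hm)

theorem pvMain (xs : List String) (seen : List String) (acc : List Int)
    (h : ∀ t ∈ seen, pvDone t acc) :
    (pvNewOf seen xs).foldl pvStepInt acc = xs.foldl pvStepInt acc := by
  induction xs generalizing seen acc with
  | nil => rfl
  | cons x xs ih =>
      simp only [pvNewOf, List.foldl_cons]
      by_cases hx : x ≠ "" ∧ x ∉ seen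
      · simp only [if_pos hx, List.foldl_cons]
        exact ih (seen ++ [x]) (pvStepInt acc x) (by
          intro t ht
          rcases List.mem_append.mp ht with h1 | h1
          · exact pvDone_grow (h t h1)
          · have : t = x := by simpa using h1
            subst this; exact pvStepInt_done)
      · simp only [if_neg hx]
        have hnoop : pvStepInt acc x = acc := by
          rcases Decidable.not_and_iff_or_not.mp hx with h1 | h1
          · have hx0 : x = "" := by simpa using h1
            subst hx0
            apply pvStepInt_noop; intro m hof
            have hnone : PySem.Int.ofStr? "" = none := by decide
            rw [hnone] at hof; exact absurd hof (by simp)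
          · have hmem : x ∈ seen := by simpa using h1
            exact pvStepInt_noop (h x hmem)
        rw [ih seen acc h, hnoop]

theorem pvFoldl_strip {α : Type} (g : α → String → α) (l : List String) (init : α) :
    l.foldl (fun a p => g a (PySem.Str.strip p)) init = (l.map PySem.Str.strip).foldl g init := by
  induction l generalizing init <;> simp [*]

-- membership-accumulator int dedup = collect-then-filter-dedup
theorem pvStepInt_eq_dedup (l : List String) (acc : List Int) :
    l.foldl pvStepInt acc = acc ++ pvDedup ((pvPosOf l).filter (fun m => m ∉ acc)) := by
  induction l generalizing acc with
  | nil => simp [pvPosOf, pvDedup_nil]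
  | cons p l ih =>
      simp only [List.foldl_cons, pvPosOf, pvStepInt]
      cases hof : PySem.Int.ofStr? p with
      | none => exact ih acc
      | some m =>
          dsimp only
          by_cases hm : 0 < m
          · simp only [if_pos hm, List.filter_cons]
            by_cases hmem : m ∈ acc
            · have : ¬ (0 < m ∧ m ∉ acc) := fun hc => hc.2 hmem
              rw [if_neg this]
              simp only [hmem, not_true_eq_false, decide_false]
              exact ih acc
            · rw [if_pos ⟨hm, hmem⟩]
              simp only [hmem, not_false_eq_true, decide_true, if_true]
              rw [ih (acc ++ [m])]
              have hfil : (pvPosOf l).filter (fun k => decide (k ∉ acc ++ [m]))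
                  = ((pvPosOf l).filter (fun k => decide (k ∉ acc))).filter (fun k => decide (k ≠ m)) := by
                rw [List.filter_filter]
                apply List.filter_congr
                intro k _
                simp [List.mem_append, and_comm, not_or]
              rw [hfil, pvDedup_cons]
              simp
          · rw [if_neg hm, if_neg (fun hc => hm hc.1)]
            exact ih acc

-- B's positives fold collects pvPosOf
theorem pvPos_foldl (l : List String) (acc : List Int) :
    l.foldl pvPosStep acc = acc ++ pvPosOf l := by
  induction l generalizing acc with
  | nil => simp [pvPosOf]
  | cons p l ih =>
      simp only [List.foldl_cons, pvPosOf, pvPosStep]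
      cases hof : PySem.Int.ofStr? p with
      | none => exact ih acc
      | some m =>
          dsimp only
          by_cases hm : 0 < m
          · simp [hm, ih]
          · simp [hm, ih]

theorem pvKey (l : List String) :
    ((l.foldl (fun out part => pvStepTok out (PySem.Str.strip part)) []).foldl pvStepInt [])
    = pvDedup (l.foldl (fun acc part => pvPosStep acc (PySem.Str.strip part)) []) := by
  rw [pvFoldl_strip pvStepTok, pvStepTok_foldl_eq, List.nil_append,
      pvMain (l.map PySem.Str.strip) [] [] (by simp),
      pvStepInt_eq_dedup,
      pvFoldl_strip pvPosStep, pvPos_foldl]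
  simp

-- ===== VERDICT (by name: the statement is the Claim_ definition above) =====
theorem resolve_months_list_spec : Claim_equal_resolve_months_list := by
  intro raw _
  unfold Spec_resolve_months_list resolve_months_list resolve_months_list_alt parse_csv_tokens
  simp only [beq_iff_eq, pvReplacePairs, List.foldl_cons, List.foldl_nil]
  by_cases h : PySem.Str.strip (if raw = "" then "" else raw) = ""
  · simp [h]
  · simp only [if_neg h]
    rw [pvKey]
    simp only [pvNormalize]
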